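-- pv_equiv track=rewrite | github.com/akimov246/leetcode | 2549. Count Distinct Numbers on Board.py | distinctIntegers
-- ===== SOURCE A (Python) =====
-- def distinctIntegers(n: int) -> int:
--     integers = set((n, ))
--     while n:
--         for i in range(1, n + 1):
--             if n % i == 1:
--                 integers.add(i)
--         n -= 1
--     return len(integers)
-- ===== SOURCE B (Python) =====
-- def distinctIntegers(n: int) -> int:
--     # Closed form: the process eventually puts 2..n-1 plus n itself on the board.
--     return max(1, n - 1)
-- ===== Notes on version B (the rewrite author's own statement) =====
-- stated objective: faster
-- what changed: Replaced the nested while/for simulation of the board process by the closed form max(1, n-1).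
import Mathlib
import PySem

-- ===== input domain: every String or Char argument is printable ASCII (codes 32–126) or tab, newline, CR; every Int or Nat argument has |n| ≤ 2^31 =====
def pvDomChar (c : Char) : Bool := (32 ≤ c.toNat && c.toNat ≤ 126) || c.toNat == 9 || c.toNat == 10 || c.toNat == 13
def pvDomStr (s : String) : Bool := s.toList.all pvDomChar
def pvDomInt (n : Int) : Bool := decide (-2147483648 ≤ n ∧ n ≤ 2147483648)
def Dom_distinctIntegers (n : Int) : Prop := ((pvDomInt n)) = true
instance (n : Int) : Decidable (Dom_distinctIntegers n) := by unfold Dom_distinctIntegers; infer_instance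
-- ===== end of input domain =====

-- B replaces A's O(n^2) simulation of the board process by the closed form max(1, n-1).

-- ===== PORT A =====
-- inner 'for i in range(1, n + 1): if n % i == 1: integers.add(i)'
def pvAInner (m : Int) (s : PySem.Set Int) : PySem.Set Int :=
  (PySem.List.pyRange 1 (m + 1) 1).foldl
    (fun s i => if PySem.Int.mod m i == 1 then PySem.Set.add s i else s) s

-- 'while n: …; n -= 1' — on negative arguments the Python loop never terminates (outside Pre_)
def pvAWhile (m : Int) (s : PySem.Set Int) : PySem.Set Int :=
  if 0 < m then pvAWhile (m - 1) (pvAInner m s) else s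
termination_by m.toNat
decreasing_by omega

def distinctIntegers (n : Int) : Int :=
  ((pvAWhile n (PySem.Set.ofList [n])).length : Int)

-- ===== PORT B =====
def distinctIntegers_alt (n : Int) : Int := max 1 (n - 1)

-- ===== PRECONDITION & SPEC =====
-- A's while loop never terminates on negative arguments (the counter only moves further from the exit), so Pre_ admits exactly the non-negative inputs.
def Pre_distinctIntegers (n : Int) : Prop := 0 ≤ n
instance (n : Int) : Decidable (Pre_distinctIntegers n) := by unfold Pre_distinctIntegers; infer_instance
def pvWitness_distinctIntegers : Int := (5)

def Spec_distinctIntegers (n : Int) (out : Int) : Prop := out = distinctIntegers_alt n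
instance (n : Int) (out : Int) : Decidable (Spec_distinctIntegers n out) := by unfold Spec_distinctIntegers; infer_instance

-- ===== CLAIM (what is proved, stated in full; the proofs are below) =====
def Claim_equal_distinctIntegers : Prop := ∀ (n : Int), Dom_distinctIntegers n → Pre_distinctIntegers n → Spec_distinctIntegers n (distinctIntegers n)

-- ===== LEMMAS AND PROOFS =====

-- membership after the filtered-add fold
theorem pv_mem_foldl_add (l : List Int) (p : Int → Bool) :
    ∀ (s : PySem.Set Int) (x : Int),
      (x ∈ l.foldl (fun s i => if p i then PySem.Set.add s i else s) s ↔
        x ∈ s ∨ (x ∈ l ∧ p x = true)) := by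
  induction l with
  | nil => simp
  | cons a t ih =>
    intro s x
    simp only [List.foldl_cons, ih, List.mem_cons]
    by_cases hp : p a = true
    · rw [if_pos hp]
      constructor
      · rintro (h | h)
        · rw [PySem.Set.mem_add] at h
          rcases h with h | h
          · exact Or.inl h
          · exact Or.inr ⟨Or.inl h, by rwa [h]⟩
        · exact Or.inr ⟨Or.inr h.1, h.2⟩
      · rintro (h | ⟨h | h, hx⟩)
        · exact Or.inl (by rw [PySem.Set.mem_add]; exact Or.inl h)
        · exact Or.inl (by rw [PySem.Set.mem_add]; exact Or.inr h)
        · exact Or.inr ⟨h, hx⟩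
    · rw [if_neg hp]
      constructor
      · rintro (h | h)
        · exact Or.inl h
        · exact Or.inr ⟨Or.inr h.1, h.2⟩
      · rintro (h | ⟨h | h, hx⟩)
        · exact Or.inl h
        · exact absurd (by rwa [h] at hx) hp
        · exact Or.inr ⟨h, hx⟩

theorem pv_nodup_foldl_add (l : List Int) (p : Int → Bool) :
    ∀ (s : PySem.Set Int), s.Nodup →
      (l.foldl (fun s i => if p i then PySem.Set.add s i else s) s).Nodup := by
  induction l with
  | nil => intro s hs; simpa using hs
  | cons a t ih =>
    intro s hs
    simp only [List.foldl_cons]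
    apply ih
    by_cases hp : p a = true
    · rw [if_pos hp]; exact PySem.Set.nodup_add _ _ hs
    · rw [if_neg hp]; exact hs

theorem pvAInner_mem (m : Int) (s : PySem.Set Int) (x : Int) :
    x ∈ pvAInner m s ↔ x ∈ s ∨ (1 ≤ x ∧ x ≤ m ∧ PySem.Int.mod m x = 1) := by
  unfold pvAInner
  rw [pv_mem_foldl_add]
  simp only [PySem.List.mem_pyRange_one, beq_iff_eq]
  constructor
  · rintro (h | ⟨⟨h1, h2⟩, h3⟩) <;> [tauto; exact Or.inr ⟨h1, by omega, h3⟩]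
  · rintro (h | ⟨h1, h2, h3⟩) <;> [tauto; exact Or.inr ⟨⟨h1, by omega⟩, h3⟩]

theorem pvAInner_nodup (m : Int) (s : PySem.Set Int) (hs : s.Nodup) :
    (pvAInner m s).Nodup := pv_nodup_foldl_add _ _ _ hs

-- the arithmetic heart: which i are ever added at step m
theorem pv_mod_range (m x : Int) (hm : 1 ≤ m) :
    ((1 ≤ x ∧ x ≤ m ∧ PySem.Int.mod m x = 1) ∨ (2 ≤ x ∧ x ≤ m - 2)) ↔
      (2 ≤ x ∧ x ≤ m - 1) := by
  constructor
  · rintro (⟨h1, h2, h3⟩ | ⟨h1, h2⟩)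
    · rw [PySem.Int.mod_eq_emod_of_pos (by omega)] at h3
      have hx1 : x ≠ 1 := by rintro rfl; simp at h3
      have hxm : x ≠ m := by rintro rfl; simp at h3
      omega
    · omega
  · rintro ⟨h1, h2⟩
    by_cases h : x ≤ m - 2
    · exact Or.inr ⟨h1, h⟩
    · have hx : x = m - 1 := by omega
      subst hx
      refine Or.inl ⟨by omega, by omega, ?_⟩
      rw [PySem.Int.mod_eq_emod_of_pos (by omega)]
      have h4 := Int.add_mul_emod_self_left (a := (1 : Int)) (b := m - 1) (c := 1)
      have h5 : (1 : Int) + (m - 1) * 1 = m := by ring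
      rw [h5] at h4
      rw [h4, Int.emod_eq_of_lt (by omega) (by omega)]

theorem pvAWhile_mem (m : Int) (hm : 0 ≤ m) :
    ∀ (s : PySem.Set Int) (x : Int),
      (x ∈ pvAWhile m s ↔ x ∈ s ∨ (2 ≤ x ∧ x ≤ m - 1)) := by
  induction m, hm using Int.le_induction with
  | base =>
    intro s x
    rw [pvAWhile]
    simp only [lt_irrefl, if_false]
    constructor
    · exact fun h => Or.inl h
    · rintro (h | h)
      · exact h
      · exact absurd h.2 (by omega)
  | succ m hm ih =>
    intro s x
    rw [pvAWhile, if_pos (by omega)]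
    have h1 : m + 1 - 1 = m := by ring
    rw [h1, ih, pvAInner_mem, or_assoc]
    have key := pv_mod_range (m + 1) x (by omega)
    constructor
    · rintro (h | hPQ)
      · exact Or.inl h
      · refine Or.inr ?_
        have h2 : 2 ≤ x ∧ x ≤ (m + 1) - 1 := key.mp (by
          rcases hPQ with h | h
          · exact Or.inl h
          · exact Or.inr ⟨h.1, by omega⟩)
        omega
    · rintro (h | h)
      · exact Or.inl h
      · refine Or.inr ?_
        have h3 := key.mpr ⟨h.1, by omega⟩
        rcases h3 with h' | h'
        · exact Or.inl h'
        · exact Or.inr ⟨h'.1, by omega⟩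

theorem pvAWhile_nodup (m : Int) (hm : 0 ≤ m) :
    ∀ (s : PySem.Set Int), s.Nodup → (pvAWhile m s).Nodup := by
  induction m, hm using Int.le_induction with
  | base => intro s hs; rw [pvAWhile]; simpa using hs
  | succ m hm ih =>
    intro s hs
    rw [pvAWhile, if_pos (by omega)]
    have h1 : m + 1 - 1 = m := by ring
    rw [h1]
    exact ih _ (pvAInner_nodup _ _ hs)

-- ===== VERDICT (by name: the statement is the Claim_ definition above) =====
theorem distinctIntegers_spec : Claim_equal_distinctIntegers := by
  intro n _ hn
  unfold Spec_distinctIntegers distinctIntegers distinctIntegers_alt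
  have hmem := pvAWhile_mem n hn (PySem.Set.ofList [n])
  have hnd := pvAWhile_nodup n hn (PySem.Set.ofList [n]) (PySem.Set.nodup_ofList _)
  -- the final board is, as a set, n :: pyRange 2 n 1
  have hL : (n :: PySem.List.pyRange 2 n 1).Nodup := by
    rw [List.nodup_cons]
    exact ⟨by simp [PySem.List.mem_pyRange_one], PySem.List.nodup_pyRange_one 2 n⟩
  have hperm : (pvAWhile n (PySem.Set.ofList [n])).Perm (n :: PySem.List.pyRange 2 n 1) :=
    (List.perm_ext_iff_of_nodup hnd hL).mpr (fun x => by
      rw [hmem]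
      simp only [PySem.Set.mem_ofList, List.mem_cons, List.not_mem_nil, or_false,
        PySem.List.mem_pyRange_one]
      omega)
  rw [hperm.length_eq]
  simp only [List.length_cons, PySem.List.length_pyRange_one]
  omega
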